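-- pv_equiv track=rewrite | github.com/srstevenson/dsa | structy/parenthetical-possibilities.py | parenthetical_possibilities
-- ===== SOURCE A (Python) =====
-- def parenthetical_possibilities(s: str) -> list[str]:
--     results: list[str] = []
--     current: list[str] = []
--
--     def _backtrack(idx: int) -> None:
--         if idx == len(s):
--             results.append("".join(current))
--             return
--
--         if s[idx] == "(":
--             close_idx = s.find(")", idx)
--             for j in range(idx + 1, close_idx):
--                 current.append(s[j])
--                 _backtrack(close_idx + 1)
--                 current.pop()
--         else:
--             current.append(s[idx])
--             _backtrack(idx + 1)
--             current.pop()
--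
--     _backtrack(0)
--     return results
-- ===== SOURCE B (Python) =====
-- def parenthetical_possibilities(s: str) -> list[str]:
--     # Parse once into choice groups, then fold a cartesian product (no recursion).
--     groups: list[str] = []
--     rest = s
--     while rest:
--         if rest[0] == "(":
--             close = rest.find(")")
--             if close == -1:
--                 return []
--             groups.append(rest[1:close])
--             rest = rest[close + 1:]
--         else:
--             groups.append(rest[0])
--             rest = rest[1:]
--     out = [""]
--     for g in groups:
--         out = [r + c for r in out for c in g]
--     return out
-- ===== Notes on version B (the rewrite author's own statement) =====
-- stated objective: alternative
-- what changed: A enumerates strings by a recursive backtracking search with a shared mutable current/results state; B first parses the string once into a list of choice groups and then builds the result list by an iterative cartesian-product fold, with no recursion.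
import Mathlib
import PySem

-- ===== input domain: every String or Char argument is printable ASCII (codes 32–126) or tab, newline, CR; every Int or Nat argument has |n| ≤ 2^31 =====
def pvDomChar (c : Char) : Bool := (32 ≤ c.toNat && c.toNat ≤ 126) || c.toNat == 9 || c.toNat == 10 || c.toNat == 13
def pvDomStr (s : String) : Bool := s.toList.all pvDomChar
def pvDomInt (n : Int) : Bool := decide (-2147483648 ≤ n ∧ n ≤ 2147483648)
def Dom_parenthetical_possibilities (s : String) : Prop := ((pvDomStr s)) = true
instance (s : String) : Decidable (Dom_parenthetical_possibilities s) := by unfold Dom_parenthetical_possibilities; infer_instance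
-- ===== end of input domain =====

-- B replaces A's backtracking recursion by one parse into choice groups followed by an
-- iterated cartesian-product fold (objective: alternative/idiomatic; same output order).

-- ===== PORT A =====
-- Literal port of A's nested `_backtrack`: `fuel` only makes the recursion structural
-- (fuel = len(s)+1 always suffices since idx strictly grows); the `none` fallbacks of the
-- index lookups are unreachable on the indices the algorithm produces (always in range).
def pvA_back (cs : List Char) : Nat → Nat → List Char → List String → List String
  | 0, _, _, results => results
  | fuel+1, idx, current, results =>
    if idx = cs.length then results ++ [String.mk current]
    else
      match cs[idx]? with
      | none => results
      | some c =>
        if c = '(' then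
          -- close_idx = s.find(")", idx); Python's -1 makes the range below empty
          let close := PySem.Chars.findFrom cs [')'] (idx : Int)
          (PySem.List.pyRange ((idx : Int) + 1) close).foldl
            (fun res j =>
              match cs[j.toNat]? with
              | none => res
              | some cj => pvA_back cs fuel (close.toNat + 1) (current ++ [cj]) res)
            results
        else pvA_back cs fuel (idx + 1) (current ++ [c]) results

def parenthetical_possibilities (s : String) : List String :=
  pvA_back s.toList (s.toList.length + 1) 0 [] []

-- ===== PORT B =====
-- rest.find(")") plus the two slices rest[1:close] and rest[close+1:], as one scan of the suffix
def pvSplitAtClose : List Char → Option (List Char × List Char)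
  | [] => none
  | c :: rest =>
    if c = ')' then some ([], rest)
    else (pvSplitAtClose rest).map (fun p => (c :: p.1, p.2))

-- termination of the parsing loop (cited by pvParseGroups's decreasing_by)
theorem pvSplitAtClose_length : ∀ (xs : List Char) (g r : List Char),
    pvSplitAtClose xs = some (g, r) → r.length < xs.length := by
  intro xs
  induction xs with
  | nil => intro g r h; simp [pvSplitAtClose] at h
  | cons c rest ih =>
    intro g r h
    simp only [pvSplitAtClose] at h
    split at h
    · simp at h
      simp [← h.2]
    · match hs : pvSplitAtClose rest with
      | none => rw [hs] at h; simp at h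
      | some (g', r') =>
        rw [hs] at h; simp at h
        have := ih g' r' hs
        simp [← h.2]
        omega

-- the parsing loop of B (returns none exactly where B early-returns [])
def pvParseGroups : List Char → Option (List (List Char))
  | [] => some []
  | c :: rest =>
    if c = '(' then
      match hs : pvSplitAtClose rest with
      | none => none
      | some (g, rest') => (pvParseGroups rest').map (g :: ·)
    else (pvParseGroups rest).map (fun gs => [c] :: gs)
termination_by cs => cs.length
decreasing_by
  · have := pvSplitAtClose_length rest g rest' hs; simp; omega
  · simp

def parenthetical_possibilities_alt (s : String) : List String :=
  match pvParseGroups s.toList with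
  | none => []
  | some groups =>
    (groups.foldl (fun out g => out.flatMap (fun r => g.map (fun c => r ++ [c])))
      [([] : List Char)]).map String.mk

-- ===== PRECONDITION & SPEC =====
def Spec_parenthetical_possibilities (s : String) (out : List String) : Prop := out = parenthetical_possibilities_alt s
instance (s : String) (out : List String) : Decidable (Spec_parenthetical_possibilities s out) := by unfold Spec_parenthetical_possibilities; infer_instance

-- ===== CLAIM (what is proved, stated in full; the proofs are below) =====
def Claim_equal_parenthetical_possibilities : Prop := ∀ (s : String), Dom_parenthetical_possibilities s → Spec_parenthetical_possibilities s (parenthetical_possibilities s)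

-- ===== LEMMAS AND PROOFS =====

-- proof-side: the list of completions A enumerates from a given suffix, in A's order
def pvCompletions : List Char → List (List Char)
  | [] => [[]]
  | c :: rest =>
    if c = '(' then
      match hs : pvSplitAtClose rest with
      | none => []
      | some (g, rest') => g.flatMap (fun ch => (pvCompletions rest').map (ch :: ·))
    else (pvCompletions rest).map (c :: ·)
termination_by cs => cs.length
decreasing_by
  · have := pvSplitAtClose_length rest g rest' hs; simp; omega
  · simp

-- proof-side: right-fold cartesian product of the groups
def pvProdR : List (List Char) → List (List Char)
  | [] => [[]]
  | g :: gs => g.flatMap (fun c => (pvProdR gs).map (c :: ·))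

-- non-dependent equation lemmas for the '(' cases of pvParseGroups / pvCompletions
theorem pvParseGroups_paren_none {rest : List Char} (h : pvSplitAtClose rest = none) :
    pvParseGroups ('(' :: rest) = none := by
  simp only [pvParseGroups]
  split
  · split <;> simp_all
  · simp_all

theorem pvParseGroups_paren_some {rest g r : List Char} (h : pvSplitAtClose rest = some (g, r)) :
    pvParseGroups ('(' :: rest) = (pvParseGroups r).map (g :: ·) := by
  simp only [pvParseGroups]
  split
  · split <;> simp_all
  · simp_all

theorem pvParseGroups_lit {c : Char} {rest : List Char} (h : c ≠ '(') :
    pvParseGroups (c :: rest) = (pvParseGroups rest).map (fun gs => [c] :: gs) := by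
  simp [pvParseGroups, h]

theorem pvCompletions_paren_none {rest : List Char} (h : pvSplitAtClose rest = none) :
    pvCompletions ('(' :: rest) = [] := by
  simp only [pvCompletions]
  split
  · split <;> simp_all
  · simp_all

theorem pvCompletions_paren_some {rest g r : List Char} (h : pvSplitAtClose rest = some (g, r)) :
    pvCompletions ('(' :: rest) = g.flatMap (fun ch => (pvCompletions r).map (ch :: ·)) := by
  simp only [pvCompletions]
  split
  · split <;> simp_all
  · simp_all

theorem pvCompletions_lit {c : Char} {rest : List Char} (h : c ≠ '(') :
    pvCompletions (c :: rest) = (pvCompletions rest).map (c :: ·) := by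
  simp [pvCompletions, h]

theorem pvCompletions_eq (cs : List Char) :
    pvCompletions cs = (match pvParseGroups cs with
      | none => []
      | some gs => pvProdR gs) := by
  fun_induction pvCompletions cs with
  | case1 => simp [pvParseGroups, pvProdR]
  | case2 rest hs =>
    rw [pvParseGroups_paren_none hs]
  | case3 rest g rest' hs ih =>
    rw [pvParseGroups_paren_some hs]
    simp only [ih]
    match hp : pvParseGroups rest' with
    | none => simp
    | some gs => simp [pvProdR]
  | case4 c rest hc ih =>
    rw [pvParseGroups_lit hc]
    simp only [ih]
    match hp : pvParseGroups rest with
    | none => simp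
    | some gs => simp [pvProdR]

theorem pvB_fold (gs : List (List Char)) : ∀ (acc : List (List Char)),
    gs.foldl (fun out g => out.flatMap (fun r => g.map (fun c => r ++ [c]))) acc
      = acc.flatMap (fun r => (pvProdR gs).map (r ++ ·)) := by
  induction gs with
  | nil => intro acc; simp [pvProdR]
  | cons g gs ih =>
    intro acc
    simp only [List.foldl_cons, ih, pvProdR]
    simp [List.flatMap_map, List.map_flatMap, List.flatMap_assoc, List.map_map, Function.comp_def]

theorem pvPyRange_natCast_aux (n : Nat) : ∀ (a : Nat),
    PySem.List.pyRange (a : Int) ((a + n : Nat) : Int) = (List.range' a n).map (Nat.cast : Nat → Int) := by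
  induction n with
  | zero =>
    intro a
    simp [PySem.List.pyRange]
  | succ n ih =>
    intro a
    rw [PySem.List.pyRange_one_cons (by push_cast; omega)]
    have : ((a : Int) + 1) = ((a+1 : Nat) : Int) := by push_cast; ring
    rw [this]
    have h2 : ((a + (n+1) : Nat) : Int) = ((a + 1 + n : Nat) : Int) := by push_cast; ring
    rw [h2, ih (a+1)]
    simp [List.range'_succ]

theorem pvPyRange_natCast (a b : Nat) :
    PySem.List.pyRange (a : Int) (b : Int) = (List.range' a (b - a)).map (Nat.cast : Nat → Int) := by
  by_cases hab : a ≤ b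
  · obtain ⟨n, rfl⟩ : ∃ n, b = a + n := ⟨b - a, by omega⟩
    rw [pvPyRange_natCast_aux]
    simp
  · have : b - a = 0 := by omega
    rw [this]
    simp [PySem.List.pyRange]
    intro h
    omega

theorem pvPyRange_nil (a : Int) (b : Int) (h : b ≤ a) : PySem.List.pyRange a b = [] := by
  simp [PySem.List.pyRange]
  intro h'
  omega

theorem pvSingleton_prefix_iff (x : Char) (l : List Char) : [x] <+: l ↔ l[0]? = some x := by
  constructor
  · rintro ⟨t, rfl⟩; simp
  · intro h
    match l with
    | [] => simp at h
    | y :: t => simp at h; exact ⟨t, by simp [h]⟩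

theorem pvSplitAtClose_none (xs : List Char) (h : ')' ∉ xs) : pvSplitAtClose xs = none := by
  induction xs with
  | nil => rfl
  | cons c rest ih =>
    simp at h
    simp [pvSplitAtClose, Ne.symm h.1, ih h.2]

theorem pvSplitAtClose_some (xs : List Char) : ∀ (m : Nat), xs[m]? = some ')' →
    (∀ i, i < m → xs[i]? ≠ some ')') →
    pvSplitAtClose xs = some (xs.take m, xs.drop (m+1)) := by
  induction xs with
  | nil => intro m hm _; simp at hm
  | cons c rest ih =>
    intro m hm hmin
    match m with
    | 0 => simp at hm; simp [pvSplitAtClose, hm]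
    | m'+1 =>
      have hc : c ≠ ')' := by
        have := hmin 0 (by omega); simpa using this
      simp at hm
      have := ih m' hm (by intro i hi; have := hmin (i+1) (by omega); simpa using this)
      simp [pvSplitAtClose, hc, this]

theorem pvMap_getD_range' (cs : List Char) : ∀ (k i : Nat), i + k ≤ cs.length →
    (List.range' i k).map (fun j => cs.getD j ' ') = (cs.drop i).take k := by
  intro k
  induction k with
  | zero => intro i _; simp
  | succ k ih =>
    intro i hik
    rw [List.range'_succ]
    have hi : i < cs.length := by omega
    rw [← List.getElem_cons_drop hi]
    simp only [List.map_cons, List.take_succ_cons, ih (i+1) (by omega)]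
    simp [List.getD, hi]

-- the main invariant: A's backtracking from idx appends exactly the completions of the
-- suffix cs.drop idx, each prefixed by `current`, in A's enumeration order
theorem pvA_back_eq (cs : List Char) : ∀ (fuel idx : Nat) (current : List Char) (results : List String),
    idx ≤ cs.length → cs.length - idx < fuel →
    pvA_back cs fuel idx current results
      = results ++ (pvCompletions (cs.drop idx)).map (fun t => String.mk (current ++ t)) := by
  intro fuel
  induction fuel with
  | zero => intro idx c r h1 h2; omega
  | succ fuel ih =>
    intro idx current results h1 h2
    by_cases hend : idx = cs.length
    · subst hend
      simp [pvA_back, List.drop_length, pvCompletions]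
    · have hlt : idx < cs.length := by omega
      have hget : cs[idx]? = some cs[idx] := List.getElem?_eq_getElem hlt
      have hdrop : cs.drop idx = cs[idx] :: cs.drop (idx+1) := (List.getElem_cons_drop hlt).symm
      by_cases hc : cs[idx] = '('
      · -- paren branch
        simp only [pvA_back, if_neg hend, hget, if_pos hc]
        by_cases hneg : PySem.Chars.findFrom cs [')'] (idx : Int) = -1
        · -- no closing paren: empty range on the left, empty completion list on the right
          have hnin : ')' ∉ cs.drop (idx+1) := by
            have := (PySem.Chars.findFrom_natCast_eq_neg_one_iff cs [')'] idx (le_of_lt hlt)).mp hneg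
            rw [List.singleton_infix_iff] at this
            intro hmem
            exact this (by rw [hdrop]; exact List.mem_cons_of_mem _ hmem)
          rw [hdrop, hc, pvCompletions_paren_none (pvSplitAtClose_none _ hnin)]
          rw [hneg, pvPyRange_nil _ _ (by omega)]
          simp
        · -- a closing paren exists, at index m = close_idx
          obtain ⟨hle, hpre, hmin⟩ :=
            PySem.Chars.findFrom_natCast_spec cs [')'] idx (le_of_lt hlt) hneg
          set cl := PySem.Chars.findFrom cs [')'] (idx : Int) with hcl
          have hcl0 : 0 ≤ cl := le_trans (by omega) hle
          obtain ⟨m, hm⟩ : ∃ m : Nat, cl = (m : Int) := ⟨cl.toNat, (Int.toNat_of_nonneg hcl0).symm⟩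
          rw [pvSingleton_prefix_iff, List.getElem?_drop] at hpre
          have hmlen : m < cs.length := by
            rcases Nat.lt_or_ge (cl.toNat + 0) cs.length with h | h
            · simpa [hm] using h
            · rw [List.getElem?_eq_none (by simpa [hm] using h)] at hpre; simp at hpre
          have hmle : idx ≤ m := by omega
          have hmget : cs[m]? = some ')' := by simpa [hm] using hpre
          have hmne : m ≠ idx := by
            intro h; rw [h, hget] at hmget; simp [hc] at hmget
          have hidx1 : idx + 1 ≤ m := by omega
          -- the characters strictly between '(' and ')' are the parsed group
          have hsplit : pvSplitAtClose (cs.drop (idx+1))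
              = some ((cs.drop (idx+1)).take (m - (idx+1)), (cs.drop (idx+1)).drop (m - (idx+1) + 1)) := by
            apply pvSplitAtClose_some
            · rw [List.getElem?_drop]
              have : idx + 1 + (m - (idx + 1)) = m := by omega
              rw [this, hmget]
            · intro i hi
              rw [List.getElem?_drop]
              intro hcontra
              have := hmin (idx + 1 + i) (by omega) (by simp [hm]; omega)
              rw [pvSingleton_prefix_iff, List.getElem?_drop] at this
              simp at this
              exact this (by simpa using hcontra)
          have hrest' : (cs.drop (idx+1)).drop (m - (idx+1) + 1) = cs.drop (m+1) := by
            rw [List.drop_drop]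
            congr 1
            omega
          rw [hm, show ((idx : Int) + 1) = ((idx + 1 : Nat) : Int) by push_cast; ring,
            pvPyRange_natCast]
          rw [List.foldl_map]
          simp only [Int.toNat_natCast]
          -- the loop over the group indices, with the recursive calls already characterised
          have hloop : ∀ (js : List Nat) (res : List String), (∀ j ∈ js, j < cs.length) →
              js.foldl (fun res j =>
                  match cs[j]? with
                  | none => res
                  | some cj => pvA_back cs fuel (m + 1) (current ++ [cj]) res) res
                = res ++ js.flatMap (fun j =>
                    (pvCompletions (cs.drop (m+1))).map (fun t => String.mk (current ++ [cs.getD j ' '] ++ t))) := by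
            intro js
            induction js with
            | nil => intro res _; simp
            | cons j js ihj =>
              intro res hjs
              have hj : j < cs.length := hjs j (List.mem_cons_self ..)
              have hgj : cs[j]? = some cs[j] := List.getElem?_eq_getElem hj
              simp only [List.foldl_cons, hgj]
              rw [ih (m + 1) (current ++ [cs[j]]) res (by omega) (by omega)]
              rw [ihj _ (fun x hx => hjs x (List.mem_cons_of_mem _ hx))]
              simp [List.getD, hj, List.append_assoc]
          rw [hloop _ results (by intro j hj; have := List.mem_range'_1.mp hj; omega)]
          rw [hdrop, hc, pvCompletions_paren_some hsplit, hrest']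
          rw [← pvMap_getD_range' cs (m - (idx+1)) (idx+1) (by omega)]
          rw [List.flatMap_map]
          simp [List.map_flatMap, List.map_map, Function.comp_def, List.append_assoc]
      · -- literal-character branch
        simp only [pvA_back, if_neg hend, hget, if_neg hc]
        rw [ih (idx+1) (current ++ [cs[idx]]) results (by omega) (by omega)]
        rw [hdrop, pvCompletions_lit hc]
        simp [List.map_map, Function.comp_def]

-- ===== VERDICT (by name: the statement is the Claim_ definition above) =====
theorem parenthetical_possibilities_spec : Claim_equal_parenthetical_possibilities := by
  intro s _
  unfold Spec_parenthetical_possibilities parenthetical_possibilities parenthetical_possibilities_alt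
  rw [pvA_back_eq s.toList (s.toList.length + 1) 0 [] [] (by omega) (by omega)]
  simp only [List.drop_zero, List.nil_append, pvCompletions_eq]
  match h : pvParseGroups s.toList with
  | none => simp
  | some gs =>
    simp only []
    rw [pvB_fold]
    simp
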